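-- pv_equiv track=rewrite | github.com/Banbury-inc/NeuraNet | Multiple_Knapsack_Algorithm/algorithms/knapsack_just_to_store.py | multiple_knapsack_with_duplication
-- ===== SOURCE A (Python) =====
-- def multiple_knapsack_with_duplication(files, devices):
--     num_files = len(files)
--     num_devices = len(devices)
--
--     # Create a 2D array to store the intermediate results of subproblems
--     dp = [[0 for _ in range(num_devices + 1)] for _ in range(num_files + 1)]
--
--     # 2D array to track the count of files allocated to each device
--     file_counts = [[0 for _ in range(num_devices)] for _ in range(num_files + 1)]
--
--     # Dynamic programming computation
--     for i in range(1, num_files + 1):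
--         file_size = files[i - 1]
--         for j in range(1, num_devices + 1):
--             device_capacity = devices[j - 1]
--             dp[i][j] = dp[i - 1][j]  # Without selecting the current file
--             for k in range(1, min(device_capacity // file_size, i) + 1):
--                 if dp[i - k][j - 1] + k * file_size > dp[i][j]:
--                     dp[i][j] = dp[i - k][j - 1] + k * file_size
--                     file_counts[i][j - 1] = k
--
--     # Backtracking to find the optimal allocation with file duplication
--     optimal_allocation = []
--     i, j = num_files, num_devices
--     while i > 0 and j > 0:
--         k = file_counts[i][j - 1]
--         for _ in range(k):
--             optimal_allocation.append((i - 1, j - 1))  # (file index, device index)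
--         i -= k
--         j -= 1
--
--     # Optimal total storage with file duplication and the allocation strategy
--     total_storage = dp[num_files][num_devices]
--     return total_storage, optimal_allocation
-- ===== SOURCE B (Python) =====
-- def multiple_knapsack_with_duplication(files, devices):
--     num_files = len(files)
--     num_devices = len(devices)
--     memo = {}
--
--     def cell(i, j):
--         # best storage using files[:i] on devices[:j], plus the copy count
--         # of file i chosen for device j (0 when keeping dp[i-1][j] is best)
--         if i == 0 or j == 0:
--             return 0, 0
--         if (i, j) in memo:
--             return memo[(i, j)]
--         size = files[i - 1]
--         best, cnt = cell(i - 1, j)[0], 0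
--         for k in range(1, min(devices[j - 1] // size, i) + 1):
--             c = cell(i - k, j - 1)[0] + k * size
--             if c > best:
--                 best, cnt = c, k
--         memo[(i, j)] = (best, cnt)
--         return best, cnt
--
--     def alloc(i, j):
--         # allocation list built directly by recursion (no backtracking table)
--         if i <= 0 or j <= 0:
--             return []
--         k = cell(i, j)[1]
--         return [(i - 1, j - 1)] * k + alloc(i - k, j - 1)
--
--     return cell(num_files, num_devices)[0], alloc(num_files, num_devices)
-- ===== Notes on version B (the rewrite author's own statement) =====
-- stated objective: alternative
-- what changed: A fills full 2-D dp and file_counts tables bottom-up with a row-major triple loop and then recovers the allocation by a separate backtracking pass over the count table; B is a top-down memoized recursion computing each cell (value, chosen copy count) on demand and builds the allocation list directly by a second recursion, with no tables and no backtracking pass.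
import Mathlib
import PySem

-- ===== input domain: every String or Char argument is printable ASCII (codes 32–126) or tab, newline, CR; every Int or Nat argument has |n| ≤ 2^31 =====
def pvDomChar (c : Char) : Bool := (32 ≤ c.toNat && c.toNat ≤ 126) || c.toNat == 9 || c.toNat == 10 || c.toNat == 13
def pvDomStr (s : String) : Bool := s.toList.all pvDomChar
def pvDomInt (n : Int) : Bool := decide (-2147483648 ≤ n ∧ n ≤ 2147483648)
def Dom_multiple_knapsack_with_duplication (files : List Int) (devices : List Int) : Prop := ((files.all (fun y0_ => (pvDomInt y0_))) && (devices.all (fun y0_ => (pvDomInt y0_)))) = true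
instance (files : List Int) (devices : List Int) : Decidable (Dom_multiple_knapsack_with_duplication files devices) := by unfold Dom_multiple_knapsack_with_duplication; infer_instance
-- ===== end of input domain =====

-- B replaces A's bottom-up 2-D dp/file_counts tables and separate backtracking pass by a
-- top-down memoized recursion per cell plus a recursion that builds the allocation directly;
-- return value only, neither program mutates its arguments.

-- ===== PORT A =====
-- 2-D table access: t[i][j] read / write (always used in range, default only for totality)
def pvGet2 (t : List (List Int)) (i j : Nat) : Int := (t.getD i []).getD j 0
def pvSet2 (t : List (List Int)) (i j : Nat) (v : Int) : List (List Int) := t.set i ((t.getD i []).set j v)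

-- the body of A's innermost 'for k in range(1, min(device_capacity // file_size, i) + 1)' loop
def pvStepK (fs : Int) (i j : Nat) (st : List (List Int) × List (List Int)) (k : Nat) :
    List (List Int) × List (List Int) :=
  if pvGet2 st.1 (i-k) (j-1) + (k:Int) * fs > pvGet2 st.1 i j then
    (pvSet2 st.1 i j (pvGet2 st.1 (i-k) (j-1) + (k:Int) * fs), pvSet2 st.2 i (j-1) (k:Int))
  else st

-- the body of A's 'for j in range(1, num_devices + 1)' loop
def pvStepJ (devices : List Int) (fs : Int) (i : Nat)
    (st : List (List Int) × List (List Int)) (j : Nat) :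
    List (List Int) × List (List Int) :=
  let device_capacity := devices.getD (j-1) 0   -- devices[j-1], index always in range
  let dp1 := pvSet2 st.1 i j (pvGet2 st.1 (i-1) j)
  (List.range' 1 ((min (PySem.Int.floordiv device_capacity fs) (i:Int)).toNat)).foldl
    (pvStepK fs i j) (dp1, st.2)

-- the body of A's 'for i in range(1, num_files + 1)' loop
def pvStepI (files devices : List Int) (st : List (List Int) × List (List Int)) (i : Nat) :
    List (List Int) × List (List Int) :=
  (List.range' 1 devices.length).foldl (pvStepJ devices (files.getD (i-1) 0) i) st

-- A's backtracking 'while i > 0 and j > 0' loop (j decreases every iteration; i stays a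
-- Python int; i is provably nonnegative whenever it is used as an index, so toNat is exact)
def pvBacktrackA (fc : List (List Int)) (i : Int) : Nat → List (Int × Int) → List (Int × Int)
  | 0, acc => acc
  | j+1, acc =>
    if i ≤ 0 then acc
    else
      let k := pvGet2 fc i.toNat j
      pvBacktrackA fc (i - k) j (acc ++ List.replicate k.toNat ((i - 1, (j:Int))))

def multiple_knapsack_with_duplication (files : List Int) (devices : List Int) : Int × (List (Int × Int)) :=
  let num_files := files.length
  let num_devices := devices.length
  let dp := List.replicate (num_files+1) (List.replicate (num_devices+1) (0:Int))
  let file_counts := List.replicate (num_files+1) (List.replicate num_devices (0:Int))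
  let st := (List.range' 1 num_files).foldl (pvStepI files devices) (dp, file_counts)
  (pvGet2 st.1 num_files num_devices, pvBacktrackA st.2 (num_files : Int) num_devices [])

-- ===== PORT B =====
-- B's 'cell(i, j)': the same recursion Source B runs; Source B's memo dict is pure caching of these
-- values and does not change them, so the port is the recursion itself. The 'for k' loop is
-- the foldl over the same range with the same (best, cnt) state.
def pvCellB (files devices : List Int) (i j : Nat) : Int × Int :=
  if _h : i = 0 ∨ j = 0 then (0, 0)
  else
    let size := files.getD (i-1) 0    -- files[i-1], index always in range
    (List.range' 1 ((min (PySem.Int.floordiv (devices.getD (j-1) 0) size) (i:Int)).toNat)).foldl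
      (fun bc k =>
        let c := (pvCellB files devices (i - k) (j-1)).1 + (k:Int) * size
        if c > bc.1 then (c, (k:Int)) else bc)
      ((pvCellB files devices (i-1) j).1, 0)
termination_by (j, i)
decreasing_by
  · apply Prod.Lex.left; omega
  · apply Prod.Lex.right; omega

-- B's 'alloc(i, j)' recursion (i stays a Python int, j counts down; k ≥ 0 so toNat is exact)
def pvAllocB (files devices : List Int) (i : Int) : Nat → List (Int × Int)
  | 0 => []
  | j+1 =>
    if i ≤ 0 then []
    else
      let k := (pvCellB files devices i.toNat (j+1)).2
      List.replicate k.toNat ((i - 1, (j:Int))) ++ pvAllocB files devices (i - k) j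

def multiple_knapsack_with_duplication_alt (files : List Int) (devices : List Int) : Int × (List (Int × Int)) :=
  let num_files := files.length
  let num_devices := devices.length
  ((pvCellB files devices num_files num_devices).1,
   pvAllocB files devices (num_files : Int) num_devices)

-- ===== PRECONDITION & SPEC =====
-- Pre_ excludes exactly the inputs where Python raises ZeroDivisionError ('cap // file_size'
-- with a zero file size, reached iff files contains 0 and devices is nonempty); B raises there too.
def Pre_multiple_knapsack_with_duplication (files : List Int) (devices : List Int) : Prop :=
  ¬ (0 : Int) ∈ files ∨ devices = []
instance (files : List Int) (devices : List Int) : Decidable (Pre_multiple_knapsack_with_duplication files devices) := by unfold Pre_multiple_knapsack_with_duplication; infer_instance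

def pvWitness_multiple_knapsack_with_duplication : List Int × List Int := ([2, 3], [5, 4])

def Spec_multiple_knapsack_with_duplication (files : List Int) (devices : List Int) (out : Int × (List (Int × Int))) : Prop := out = multiple_knapsack_with_duplication_alt files devices
instance (files : List Int) (devices : List Int) (out : Int × (List (Int × Int))) : Decidable (Spec_multiple_knapsack_with_duplication files devices out) := by unfold Spec_multiple_knapsack_with_duplication; infer_instance

-- ===== CLAIM (what is proved, stated in full; the proofs are below) =====
def Claim_equal_multiple_knapsack_with_duplication : Prop := ∀ (files : List Int) (devices : List Int), Dom_multiple_knapsack_with_duplication files devices → Pre_multiple_knapsack_with_duplication files devices → Spec_multiple_knapsack_with_duplication files devices (multiple_knapsack_with_duplication files devices)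

-- ===== LEMMAS AND PROOFS =====

-- running best value / count / current candidate position over a candidate list: the common
-- shape of A's per-cell k-scan and of B's per-cell foldl
def pvScan : Int → Int → Int → List Int → Int × Int
  | best, cnt, _, [] => (best, cnt)
  | best, cnt, k, c :: cs => if c > best then pvScan c k (k+1) cs else pvScan best cnt (k+1) cs

-- B's foldl over range' is pvScan on the mapped candidate list
theorem pvFoldScan (f : Nat → Int) : ∀ (n k0 : Nat) (b c : Int),
    (List.range' k0 n).foldl
        (fun (bc : Int × Int) k => let cv := f k; if cv > bc.1 then (cv, (k:Int)) else bc) (b, c)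
      = pvScan b c (k0:Int) ((List.range' k0 n).map f) := by
  intro n
  induction n with
  | zero => intro k0 b c; simp [pvScan]
  | succ m ih =>
    intro k0 b c
    rw [List.range'_succ, List.foldl_cons, List.map_cons]
    have hcast : ((k0+1 : Nat) : Int) = (k0:Int)+1 := by push_cast; ring
    simp only [pvScan]
    by_cases hgt : f k0 > b
    · simpa [hcast, hgt] using ih (k0+1) (f k0) (k0:Int)
    · simpa [hcast, hgt] using ih (k0+1) b c

theorem pvCellB_base (files devices : List Int) (i j : Nat) (h : i = 0 ∨ j = 0) :
    pvCellB files devices i j = (0, 0) := by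
  rw [pvCellB]; simp [h]

theorem pvCellB_succ (files devices : List Int) (i j : Nat) (hi : i ≠ 0) (hj : j ≠ 0) :
    pvCellB files devices i j =
      pvScan (pvCellB files devices (i-1) j).1 0 1
        ((List.range' 1 ((min (PySem.Int.floordiv (devices.getD (j-1) 0) (files.getD (i-1) 0))
            (i:Int)).toNat)).map
          (fun k => (pvCellB files devices (i - k) (j-1)).1 + (k:Int) * (files.getD (i-1) 0))) := by
  rw [pvCellB]
  simp only [hi, hj, or_self, dif_neg, not_false_iff]
  have := pvFoldScan (fun k => (pvCellB files devices (i - k) (j-1)).1 + (k:Int) * (files.getD (i-1) 0))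
    ((min (PySem.Int.floordiv (devices.getD (j-1) 0) (files.getD (i-1) 0)) (i:Int)).toNat) 1
    (pvCellB files devices (i-1) j).1 0
  simpa using this

-- == table lemmas ==
theorem pvGet2_pvSet2 (t : List (List Int)) (i j i' j' : Nat) (v : Int)
    (hi : i < t.length) (hj : j < (t.getD i []).length) :
    pvGet2 (pvSet2 t i j v) i' j' = if i' = i ∧ j' = j then v else pvGet2 t i' j' := by
  unfold pvGet2 pvSet2
  rw [List.getD_eq_getElem?_getD (l := t)] at hj
  by_cases h1 : i' = i
  · subst h1
    simp only [List.getD_eq_getElem?_getD, List.getElem?_set, if_pos hi]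
    by_cases h2 : j' = j
    · subst h2
      simp [hj]
    · simp [Ne.symm h2, h2]
  · simp [List.getD_eq_getElem?_getD, Ne.symm h1, h1]

theorem pvSet2_pvSet2 (t : List (List Int)) (i j : Nat) (v w : Int) (hi : i < t.length) :
    pvSet2 (pvSet2 t i j v) i j w = pvSet2 t i j w := by
  unfold pvSet2
  rw [List.set_set]
  congr 1
  rw [List.getD_eq_getElem?_getD, List.getElem?_set, if_pos rfl, if_pos hi]
  simp [List.set_set, List.getD_eq_getElem?_getD]

theorem pvSet2_self (t : List (List Int)) (i j : Nat) (hi : i < t.length)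
    (hj : j < (t.getD i []).length) :
    pvSet2 t i j (pvGet2 t i j) = t := by
  unfold pvSet2 pvGet2
  have h1 : (t.getD i []).getD j 0 = (t.getD i [])[j] := by
    rw [List.getD_eq_getElem?_getD, List.getElem?_eq_getElem hj]; rfl
  rw [h1, List.set_getElem_self hj]
  have h2 : t.getD i [] = t[i] := by
    rw [List.getD_eq_getElem?_getD, List.getElem?_eq_getElem hi]; rfl
  rw [h2, List.set_getElem_self hi]

theorem pvGet2_replicate (r c : Nat) (i j : Nat) :
    pvGet2 (List.replicate r (List.replicate c (0:Int))) i j = 0 := by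
  unfold pvGet2
  rcases Nat.lt_or_ge i r with h | h
  · rcases Nat.lt_or_ge j c with h2 | h2
    · simp [List.getD_eq_getElem?_getD, h, h2]
    · simp [List.getD_eq_getElem?_getD, h, Nat.not_lt.2 h2]
  · simp [List.getD_eq_getElem?_getD, Nat.not_lt.2 h]

-- == pvScan characterization (used for the count bound) ==
theorem pvScan_eq (cs : List Int) : ∀ (s c0 k : Int),
    pvScan s c0 k cs =
      (PySem.List.max? cs (fun x => x)).elim (s, c0)
        (fun m => if s < m then (m, k + (((PySem.List.index? cs m).getD 0 : Nat) : Int))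
                  else (s, c0)) := by
  induction cs with
  | nil => intro s c0 k; simp [pvScan, PySem.List.max?]
  | cons c t ih =>
    intro s c0 k
    rw [PySem.List.max?_id_cons]
    simp only [Option.elim_some]
    have hle := PySem.List.le_foldl_max t c
    have hmem := PySem.List.foldl_max_mem t c
    set M := List.foldl max c t with hM
    simp only [pvScan]
    by_cases hc : c > s
    · rw [if_pos hc, ih c k (k+1)]
      rcases ht : PySem.List.max? t (fun x => x) with _ | m'
      · simp only [Option.elim_none]
        have : t = [] := (PySem.List.max?_eq_none_iff t _).1 ht
        subst this
        simp only [hM, List.foldl_nil]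
        rw [if_pos hc]
        rw [PySem.List.index?_cons_self]
        simp
      · simp only [Option.elim_some]
        have hm't : m' ∈ t := PySem.List.max?_mem ht
        have hm'max : ∀ y ∈ t, y ≤ m' := PySem.List.max?_isMax ht
        have hMm' : M ≤ max c m' := by
          rcases hmem with h | h
          · simp [h]
          · exact le_trans (hm'max _ h) (le_max_right _ _)
        have hm'M : m' ≤ M := hle.2 _ hm't
        have hcM : c ≤ M := hle.1
        by_cases hcm : c < m'
        · have hMeq : M = m' := le_antisymm (by omega) hm'M
          rw [if_pos hcm, if_pos (by omega : s < M)]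
          rw [hMeq, PySem.List.index?_cons_of_ne t (by omega : c ≠ m')]
          have hsome : (PySem.List.index? t m').isSome :=
            (PySem.List.index?_isSome_iff t m').2 hm't
          rcases hidx : PySem.List.index? t m' with _ | n
          · rw [hidx] at hsome; simp at hsome
          · simp; ring
        · have hMeq : M = c := le_antisymm (by omega) hcM
          rw [if_neg hcm, if_pos (by omega : s < M), hMeq,
            PySem.List.index?_cons_self]
          simp
    · rw [if_neg hc, ih s c0 (k+1)]
      rcases ht : PySem.List.max? t (fun x => x) with _ | m'
      · simp only [Option.elim_none]
        have : t = [] := (PySem.List.max?_eq_none_iff t _).1 ht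
        subst this
        simp only [hM, List.foldl_nil]
        rw [if_neg (by omega : ¬ s < c)]
      · simp only [Option.elim_some]
        have hm't : m' ∈ t := PySem.List.max?_mem ht
        have hm'max : ∀ y ∈ t, y ≤ m' := PySem.List.max?_isMax ht
        have hm'M : m' ≤ M := hle.2 _ hm't
        have hcM : c ≤ M := hle.1
        have hMle : M ≤ max c m' := by
          rcases hmem with h | h
          · simp [h]
          · exact le_trans (hm'max _ h) (le_max_right _ _)
        by_cases hsm : s < m'
        · have hMeq : M = m' := le_antisymm (by omega) hm'M
          rw [if_pos hsm, if_pos (by omega : s < M), hMeq,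
            PySem.List.index?_cons_of_ne t (by omega : c ≠ m')]
          have hsome : (PySem.List.index? t m').isSome :=
            (PySem.List.index?_isSome_iff t m').2 hm't
          rcases hidx : PySem.List.index? t m' with _ | n
          · rw [hidx] at hsome; simp at hsome
          · simp; ring
        · rw [if_neg hsm, if_neg (by omega : ¬ s < M)]

-- == well-formedness of A's 2-D tables ==
def pvWF2 (t : List (List Int)) (r c : Nat) : Prop :=
  t.length = r ∧ ∀ row ∈ t, row.length = c

theorem pvWF2_replicate (r c : Nat) :
    pvWF2 (List.replicate r (List.replicate c (0:Int))) r c := by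
  constructor
  · simp
  · intro row hrow
    rw [List.eq_of_mem_replicate hrow]; simp

theorem pvWF2_row (t : List (List Int)) (r c i : Nat) (h : pvWF2 t r c) (hi : i < r) :
    (t.getD i []).length = c := by
  have hlen : i < t.length := by rw [h.1]; exact hi
  rw [List.getD_eq_getElem?_getD, List.getElem?_eq_getElem hlen]
  exact h.2 _ (List.getElem_mem hlen)

theorem pvWF2_set2 (t : List (List Int)) (r c i j : Nat) (v : Int)
    (h : pvWF2 t r c) (hi : i < r) :
    pvWF2 (pvSet2 t i j v) r c := by
  constructor
  · simp [pvSet2, h.1]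
  · intro row hrow
    rcases List.mem_or_eq_of_mem_set hrow with hmem | heq
    · exact h.2 _ hmem
    · rw [heq, List.length_set]
      exact pvWF2_row t r c i h hi

-- == the k-loop of A computes pvScan on the candidate list ==
theorem pvKfold (fs : Int) (i j r c c' : Nat)
    (hi1 : 1 ≤ i) (hir : i < r) (_hj1 : 1 ≤ j) (hjc : j < c) (_hjc' : j - 1 < c') :
    ∀ (n k0 : Nat), 1 ≤ k0 →
    ∀ (dp fc : List (List Int)) (b cnt : Int), pvWF2 dp r c → pvWF2 fc r c' →
    (List.range' k0 n).foldl (pvStepK fs i j) (pvSet2 dp i j b, pvSet2 fc i (j-1) cnt) =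
      (pvSet2 dp i j (pvScan b cnt (k0:Int)
          ((List.range' k0 n).map (fun k => pvGet2 dp (i-k) (j-1) + (k:Int) * fs))).1,
       pvSet2 fc i (j-1) (pvScan b cnt (k0:Int)
          ((List.range' k0 n).map (fun k => pvGet2 dp (i-k) (j-1) + (k:Int) * fs))).2) := by
  intro n
  induction n with
  | zero =>
    intro k0 _ dp fc b cnt _ _
    simp [pvScan]
  | succ m ih =>
    intro k0 hk0 dp fc b cnt hdp hfc
    have hdpl : i < dp.length := by rw [hdp.1]; exact hir
    have hdprow : j < (dp.getD i []).length := by rw [pvWF2_row dp r c i hdp hir]; exact hjc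
    have hne : ¬ (i - k0 = i ∧ j - 1 = j) := by
      intro hcontra; omega
    rw [List.range'_succ, List.foldl_cons, List.map_cons]
    have hread : pvGet2 (pvSet2 dp i j b) (i-k0) (j-1) = pvGet2 dp (i-k0) (j-1) := by
      rw [pvGet2_pvSet2 dp i j (i-k0) (j-1) b hdpl hdprow, if_neg hne]
    have hcur : pvGet2 (pvSet2 dp i j b) i j = b := by
      rw [pvGet2_pvSet2 dp i j i j b hdpl hdprow, if_pos ⟨rfl, rfl⟩]
    show (List.range' (k0+1) m).foldl (pvStepK fs i j)
        (pvStepK fs i j (pvSet2 dp i j b, pvSet2 fc i (j-1) cnt) k0) = _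
    have hfcl : i < fc.length := by rw [hfc.1]; exact hir
    have hcast : ((k0+1 : Nat) : Int) = (k0:Int)+1 := by push_cast; ring
    by_cases hgt : pvGet2 dp (i-k0) (j-1) + (k0:Int) * fs > b
    · have hstep : pvStepK fs i j (pvSet2 dp i j b, pvSet2 fc i (j-1) cnt) k0 =
          (pvSet2 dp i j (pvGet2 dp (i-k0) (j-1) + (k0:Int) * fs), pvSet2 fc i (j-1) (k0:Int)) := by
        unfold pvStepK
        simp only [hread, hcur]
        rw [if_pos hgt, pvSet2_pvSet2 dp i j b _ hdpl, pvSet2_pvSet2 fc i (j-1) cnt _ hfcl]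
      rw [hstep, ih (k0+1) (by omega) dp fc (pvGet2 dp (i-k0) (j-1) + (k0:Int) * fs) (k0:Int) hdp hfc]
      simp only [pvScan]
      rw [if_pos hgt, hcast]
    · have hstep : pvStepK fs i j (pvSet2 dp i j b, pvSet2 fc i (j-1) cnt) k0 =
          (pvSet2 dp i j b, pvSet2 fc i (j-1) cnt) := by
        unfold pvStepK
        simp only [hread, hcur]
        rw [if_neg hgt]
      rw [hstep, ih (k0+1) (by omega) dp fc b cnt hdp hfc]
      simp only [pvScan]
      rw [if_neg hgt, hcast]

-- == invariants for A's row-major double loop, stated against B's recursion pvCellB ==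
def pvInvA (files devices : List Int) (st : List (List Int) × List (List Int)) (i0 : Nat) : Prop :=
  pvWF2 st.1 (files.length+1) (devices.length+1) ∧
  pvWF2 st.2 (files.length+1) devices.length ∧
  (∀ i j, i ≤ files.length → j ≤ devices.length →
     pvGet2 st.1 i j = if i ≤ i0 then (pvCellB files devices i j).1 else 0) ∧
  (∀ i j', i ≤ files.length → j' < devices.length →
     pvGet2 st.2 i j' = if i ≤ i0 then (pvCellB files devices i (j'+1)).2 else 0)

def pvInvRow (files devices : List Int) (st : List (List Int) × List (List Int))
    (i : Nat) (j0 : Nat) : Prop :=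
  pvWF2 st.1 (files.length+1) (devices.length+1) ∧
  pvWF2 st.2 (files.length+1) devices.length ∧
  (∀ i' j, i' ≤ files.length → j ≤ devices.length → i' ≠ i →
     pvGet2 st.1 i' j = if i' < i then (pvCellB files devices i' j).1 else 0) ∧
  (∀ j, j ≤ devices.length → pvGet2 st.1 i j = if j ≤ j0 then (pvCellB files devices i j).1 else 0) ∧
  (∀ i' j', i' ≤ files.length → j' < devices.length →
     pvGet2 st.2 i' j' = if i' < i ∨ (i' = i ∧ j' + 1 ≤ j0)
       then (pvCellB files devices i' (j'+1)).2 else 0)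

theorem pvStepJ_inv (files devices : List Int) (st : List (List Int) × List (List Int))
    (i j0 : Nat) (hi1 : 1 ≤ i) (hinf : i ≤ files.length) (hj0 : j0 < devices.length)
    (h : pvInvRow files devices st i j0) :
    pvInvRow files devices (pvStepJ devices (files.getD (i-1) 0) i st (j0+1)) i (j0+1) := by
  obtain ⟨hdp, hfc, h3, h4, h5⟩ := h
  have hdpl : i < st.1.length := by rw [hdp.1]; omega
  have hdprow : j0+1 < (st.1.getD i []).length := by
    rw [pvWF2_row st.1 (files.length+1) (devices.length+1) i hdp (by omega)]; omega
  have hfcl : i < st.2.length := by rw [hfc.1]; omega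
  have hfcrow : j0 < (st.2.getD i []).length := by
    rw [pvWF2_row st.2 (files.length+1) devices.length i hfc (by omega)]; omega
  have h50 : pvGet2 st.2 i j0 = 0 := by
    rw [h5 i j0 hinf hj0, if_neg (by omega)]
  have hskip : pvGet2 st.1 (i-1) (j0+1) = (pvCellB files devices (i-1) (j0+1)).1 := by
    rw [h3 (i-1) (j0+1) (by omega) (by omega) (by omega), if_pos (by omega)]
  have hzero : pvSet2 st.2 i j0 0 = st.2 := by
    rw [← h50]; exact pvSet2_self st.2 i j0 hfcl hfcrow
  have hk := pvKfold (files.getD (i-1) 0) i (j0+1) (files.length+1) (devices.length+1)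
      devices.length hi1 (by omega) (by omega) (by omega) (by omega)
      ((min (PySem.Int.floordiv (devices.getD j0 0) (files.getD (i-1) 0)) (i:Int)).toNat) 1
      (le_refl 1) st.1 st.2 ((pvCellB files devices (i-1) (j0+1)).1) 0 hdp hfc
  simp only [Nat.add_sub_cancel, Nat.cast_one] at hk
  rw [hzero] at hk
  have hcands : (List.range' 1 ((min (PySem.Int.floordiv (devices.getD j0 0)
        (files.getD (i-1) 0)) (i:Int)).toNat)).map
        (fun k => pvGet2 st.1 (i-k) j0 + (k:Int) * (files.getD (i-1) 0)) =
      (List.range' 1 ((min (PySem.Int.floordiv (devices.getD j0 0)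
        (files.getD (i-1) 0)) (i:Int)).toNat)).map
        (fun k => (pvCellB files devices (i-k) j0).1 + (k:Int) * (files.getD (i-1) 0)) := by
    apply List.map_congr_left
    intro k hk'
    have hk1 : 1 ≤ k := (List.mem_range'_1.1 hk').1
    rw [h3 (i-k) j0 (by omega) (by omega) (by omega), if_pos (by omega)]
  rw [hcands] at hk
  have hP : pvScan (pvCellB files devices (i-1) (j0+1)).1 0 1
      ((List.range' 1 ((min (PySem.Int.floordiv (devices.getD j0 0)
        (files.getD (i-1) 0)) (i:Int)).toNat)).map
        (fun k => (pvCellB files devices (i-k) j0).1 + (k:Int) * (files.getD (i-1) 0))) =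
      pvCellB files devices i (j0+1) := by
    rw [pvCellB_succ files devices i (j0+1) (by omega) (by omega)]
    simp only [Nat.add_sub_cancel]
  rw [hP] at hk
  have hgoal : pvStepJ devices (files.getD (i-1) 0) i st (j0+1) =
      (pvSet2 st.1 i (j0+1) (pvCellB files devices i (j0+1)).1,
       pvSet2 st.2 i j0 (pvCellB files devices i (j0+1)).2) := by
    unfold pvStepJ
    simp only [Nat.add_sub_cancel]
    rw [hskip]
    exact hk
  rw [hgoal]
  refine ⟨pvWF2_set2 _ _ _ _ _ _ hdp (by omega), pvWF2_set2 _ _ _ _ _ _ hfc (by omega), ?_, ?_, ?_⟩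
  · intro i' j hi' hj hne
    rw [pvGet2_pvSet2 st.1 i (j0+1) i' j _ hdpl hdprow, if_neg (by omega)]
    exact h3 i' j hi' hj hne
  · intro j hj
    rw [pvGet2_pvSet2 st.1 i (j0+1) i j _ hdpl hdprow]
    by_cases hjj : j = j0+1
    · rw [if_pos ⟨rfl, hjj⟩, if_pos (by omega), hjj]
    · rw [if_neg (by omega), h4 j hj]
      by_cases hle : j ≤ j0
      · rw [if_pos hle, if_pos (by omega)]
      · rw [if_neg hle, if_neg (by omega)]
  · intro i' j' hi' hj'
    rw [pvGet2_pvSet2 st.2 i j0 i' j' _ hfcl hfcrow]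
    by_cases hcell : i' = i ∧ j' = j0
    · rw [if_pos hcell, if_pos (by omega), hcell.1, hcell.2]
    · rw [if_neg hcell, h5 i' j' hi' hj']
      by_cases hcond : i' < i ∨ (i' = i ∧ j' + 1 ≤ j0)
      · rw [if_pos hcond, if_pos (by omega)]
      · rw [if_neg hcond, if_neg (by omega)]

theorem pvRowFold (files devices : List Int) (st : List (List Int) × List (List Int))
    (i : Nat) (hi1 : 1 ≤ i) (hinf : i ≤ files.length) (h : pvInvRow files devices st i 0) :
    ∀ n, n ≤ devices.length →
      pvInvRow files devices
        ((List.range' 1 n).foldl (pvStepJ devices (files.getD (i-1) 0) i) st) i n := by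
  intro n
  induction n with
  | zero => intro _; simpa using h
  | succ m ih =>
    intro hle
    rw [List.range'_concat, List.foldl_append]
    have := pvStepJ_inv files devices
      ((List.range' 1 m).foldl (pvStepJ devices (files.getD (i-1) 0) i) st) i m hi1 hinf
      (by omega) (ih (by omega))
    simpa [Nat.add_comm 1 m] using this

theorem pvStepI_inv (files devices : List Int) (st : List (List Int) × List (List Int))
    (i0 : Nat) (hi0 : i0 < files.length) (h : pvInvA files devices st i0) :
    pvInvA files devices (pvStepI files devices st (i0+1)) (i0+1) := by
  obtain ⟨hdp, hfc, h3, h4⟩ := h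
  have hrow0 : pvInvRow files devices st (i0+1) 0 := by
    refine ⟨hdp, hfc, ?_, ?_, ?_⟩
    · intro i' j hi' hj _
      rw [h3 i' j hi' hj]
      by_cases hle : i' ≤ i0
      · rw [if_pos hle, if_pos (by omega)]
      · rw [if_neg hle, if_neg (by omega)]
    · intro j hj
      rw [h3 (i0+1) j (by omega) hj, if_neg (by omega)]
      rcases Nat.eq_zero_or_pos j with h0 | h0
      · subst h0
        rw [if_pos (by omega), pvCellB_base files devices (i0+1) 0 (Or.inr rfl)]
      · rw [if_neg (by omega)]
    · intro i' j' hi' hj'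
      rw [h4 i' j' hi' hj']
      by_cases hle : i' ≤ i0
      · rw [if_pos hle, if_pos (by omega)]
      · rw [if_neg hle, if_neg (by omega)]
  have hfin := pvRowFold files devices st (i0+1) (by omega) (by omega) hrow0
    devices.length (le_refl _)
  simp only [Nat.add_sub_cancel] at hfin
  obtain ⟨g1, g2, g3, g4, g5⟩ := hfin
  unfold pvStepI
  simp only [Nat.add_sub_cancel]
  refine ⟨g1, g2, ?_, ?_⟩
  · intro i j hi hj
    by_cases heq : i = i0+1
    · subst heq
      rw [g4 j hj, if_pos hj, if_pos (by omega)]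
    · rw [g3 i j hi hj heq]
      by_cases hlt : i < i0+1
      · rw [if_pos hlt, if_pos (by omega)]
      · rw [if_neg hlt, if_neg (by omega)]
  · intro i' j' hi' hj'
    rw [g5 i' j' hi' hj']
    by_cases hcond : i' < i0+1 ∨ (i' = i0+1 ∧ j' + 1 ≤ devices.length)
    · rw [if_pos hcond, if_pos (by omega)]
    · rw [if_neg hcond, if_neg (by omega)]

theorem pvAFold (files devices : List Int) : ∀ n, n ≤ files.length →
    pvInvA files devices
      ((List.range' 1 n).foldl (pvStepI files devices)
        (List.replicate (files.length+1) (List.replicate (devices.length+1) (0:Int)),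
         List.replicate (files.length+1) (List.replicate devices.length (0:Int)))) n := by
  intro n
  induction n with
  | zero =>
    intro _
    simp only [List.range'_zero, List.foldl_nil]
    refine ⟨pvWF2_replicate _ _, pvWF2_replicate _ _, ?_, ?_⟩
    · intro i j _ _
      rw [pvGet2_replicate]
      rcases Nat.eq_zero_or_pos i with h0 | h0
      · subst h0; rw [pvCellB_base files devices 0 j (Or.inl rfl)]; simp
      · rw [if_neg (by omega)]
    · intro i j' _ _
      rw [pvGet2_replicate]
      rcases Nat.eq_zero_or_pos i with h0 | h0
      · subst h0; rw [pvCellB_base files devices 0 (j'+1) (Or.inl rfl)]; simp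
      · rw [if_neg (by omega)]
  | succ m ih =>
    intro hle
    rw [List.range'_concat, List.foldl_append]
    have := pvStepI_inv files devices _ m (by omega) (ih (by omega))
    simpa [Nat.add_comm 1 m] using this

-- == the count component is bounded by the row index ==
theorem pvCellB_cnt_bound (files devices : List Int) (i j : Nat) :
    0 ≤ (pvCellB files devices i j).2 ∧ (pvCellB files devices i j).2 ≤ (i:Int) := by
  by_cases h : i = 0 ∨ j = 0
  · rw [pvCellB_base files devices i j h]
    constructor
    · simp
    · simp
  · rw [not_or] at h
    rw [pvCellB_succ files devices i j h.1 h.2, pvScan_eq]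
    set cands := (List.range' 1 ((min (PySem.Int.floordiv (devices.getD (j-1) 0)
        (files.getD (i-1) 0)) (i:Int)).toNat)).map
        (fun k => (pvCellB files devices (i-k) (j-1)).1 + (k:Int) * (files.getD (i-1) 0)) with hcdef
    rcases hmax : PySem.List.max? cands (fun x => x) with _ | M
    · simp
    · simp only [Option.elim_some]
      by_cases hlt : (pvCellB files devices (i-1) j).1 < M
      · rw [if_pos hlt]
        have hMmem : M ∈ cands := PySem.List.max?_mem hmax
        have hsome : (PySem.List.index? cands M).isSome :=
          (PySem.List.index?_isSome_iff cands M).2 hMmem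
        rcases hidx : PySem.List.index? cands M with _ | idx
        · rw [hidx] at hsome; simp at hsome
        · obtain ⟨hlen, _, _⟩ := PySem.List.getElem_of_index?_eq_some hidx
          have hK : cands.length ≤ i := by
            rw [hcdef, List.length_map, List.length_range']
            have h1 : (min (PySem.Int.floordiv (devices.getD (j-1) 0)
                (files.getD (i-1) 0)) (i:Int)).toNat ≤ ((i:Int)).toNat :=
              Int.toNat_le_toNat (min_le_right _ _)
            omega
          simp only [Option.getD_some]
          constructor
          · positivity
          · have : idx + 1 ≤ i := by omega
            omega
      · rw [if_neg hlt]
        constructor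
        · simp
        · simp

-- == A's backtracking equals B's allocation recursion ==
theorem pvBt_eq (files devices : List Int) (fc : List (List Int))
    (hfc : ∀ i j', i ≤ files.length → j' < devices.length →
      pvGet2 fc i j' = (pvCellB files devices i (j'+1)).2) :
    ∀ (j : Nat), j ≤ devices.length → ∀ (i : Int) (acc : List (Int × Int)),
      0 ≤ i → i ≤ (files.length : Int) →
      pvBacktrackA fc i j acc = acc ++ pvAllocB files devices i j := by
  intro j
  induction j with
  | zero => intro _ i acc _ _; simp [pvBacktrackA, pvAllocB]
  | succ m ih =>
    intro hle i acc h0 hnf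
    unfold pvBacktrackA pvAllocB
    by_cases hi0 : i ≤ 0
    · rw [if_pos hi0, if_pos hi0]; simp
    · rw [if_neg hi0, if_neg hi0]
      have hitn : i.toNat ≤ files.length := by omega
      have hkA : pvGet2 fc i.toNat m = (pvCellB files devices i.toNat (m+1)).2 :=
        hfc i.toNat m hitn (by omega)
      rw [hkA]
      have hbound := pvCellB_cnt_bound files devices i.toNat (m+1)
      rw [ih (by omega) _ _ (by omega) (by omega), List.append_assoc]

-- ===== VERDICT (by name: the statement is the Claim_ definition above) =====
theorem multiple_knapsack_with_duplication_spec : Claim_equal_multiple_knapsack_with_duplication := by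
  intro files devices _ _
  unfold Spec_multiple_knapsack_with_duplication
  simp only [multiple_knapsack_with_duplication, multiple_knapsack_with_duplication_alt]
  have hA := pvAFold files devices files.length (le_refl _)
  obtain ⟨_, _, hdp, hfc⟩ := hA
  rw [Prod.mk.injEq]
  constructor
  · rw [hdp files.length devices.length (le_refl _) (le_refl _), if_pos (le_refl _)]
  · have hfc' : ∀ i j', i ≤ files.length → j' < devices.length →
        pvGet2 ((List.range' 1 files.length).foldl (pvStepI files devices)
          (List.replicate (files.length+1) (List.replicate (devices.length+1) (0:Int)),
           List.replicate (files.length+1) (List.replicate devices.length (0:Int)))).2 i j'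
          = (pvCellB files devices i (j'+1)).2 := by
      intro i j' hi hj'
      rw [hfc i j' hi hj', if_pos hi]
    have hbt := pvBt_eq files devices _ hfc' devices.length (le_refl _)
      (files.length : Int) [] (by positivity) (le_refl _)
    simpa using hbt
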